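-- pv_equiv track=rewrite | github.com/xtakacsx/bitesofpy | 91/anyall.py | contains_only_vowels
-- ===== SOURCE A (Python) =====
-- VOWELS = 'aeiou'
--
-- def contains_only_vowels(input_str: str) -> bool:
--     """Receives input string and checks if all chars are
--        VOWELS. Match is case insensitive."""
--     count = 0
--     for w in input_str.lower():
--         if w in VOWELS:
--             count += 1
--     if count == len(input_str):
--         return True
--     else:
--         return False
-- ===== SOURCE B (Python) =====
-- VOWELS = 'aeiou'
--
-- def contains_only_vowels(input_str: str) -> bool:
--     """Receives input string and checks if all chars are
--        VOWELS. Match is case insensitive."""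
--     return set(input_str.lower()).issubset(set(VOWELS))
-- ===== Notes on version B (the rewrite author's own statement) =====
-- stated objective: idiomatic
-- what changed: Replaces the explicit counting loop plus length comparison with a dedup-into-a-set followed by a subset test against the vowel set.
import Mathlib
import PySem

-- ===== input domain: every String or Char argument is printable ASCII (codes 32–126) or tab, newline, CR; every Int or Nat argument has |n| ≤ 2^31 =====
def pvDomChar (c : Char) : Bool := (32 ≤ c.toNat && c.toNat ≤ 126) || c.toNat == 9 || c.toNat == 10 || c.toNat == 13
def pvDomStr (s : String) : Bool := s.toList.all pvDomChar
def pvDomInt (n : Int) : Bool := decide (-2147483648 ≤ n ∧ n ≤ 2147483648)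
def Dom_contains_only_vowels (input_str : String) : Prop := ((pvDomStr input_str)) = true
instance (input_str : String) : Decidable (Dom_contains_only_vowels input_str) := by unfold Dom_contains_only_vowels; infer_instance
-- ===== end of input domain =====

-- ===== PORT A =====
-- VOWELS = 'aeiou'; 'w in VOWELS' for the single char w is membership of w in the vowel chars
def pvVOWELS : List Char := "aeiou".toList

def contains_only_vowels (input_str : String) : Bool :=
  let count : Int :=
    (PySem.Str.lower input_str).toList.foldl
      (fun count w => if w ∈ pvVOWELS then count + 1 else count) 0
  if count = (PySem.Str.len input_str : Int) then true else false

-- ===== PORT B =====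
def contains_only_vowels_alt (input_str : String) : Bool :=
  PySem.Set.issubset (PySem.Set.ofList (PySem.Str.lower input_str).toList)
    (PySem.Set.ofList pvVOWELS)

-- ===== PRECONDITION & SPEC =====
def Spec_contains_only_vowels (input_str : String) (out : Bool) : Prop := out = contains_only_vowels_alt input_str
instance (input_str : String) (out : Bool) : Decidable (Spec_contains_only_vowels input_str out) := by unfold Spec_contains_only_vowels; infer_instance

-- ===== CLAIM (what is proved, stated in full; the proofs are below) =====
def Claim_equal_contains_only_vowels : Prop := ∀ (input_str : String), Dom_contains_only_vowels input_str → Spec_contains_only_vowels input_str (contains_only_vowels input_str)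

-- ===== LEMMAS AND PROOFS =====

-- ===== VERDICT (by name: the statement is the Claim_ definition above) =====
-- the counting loop computes 0 + countP (· ∈ pvVOWELS)
theorem pv_foldl_count (l : List Char) (c : Int) :
    l.foldl (fun count w => if w ∈ pvVOWELS then count + 1 else count) c
      = c + l.countP (· ∈ pvVOWELS) := by
  induction l generalizing c with
  | nil => simp
  | cons x xs ih =>
    simp only [List.foldl_cons, List.countP_cons, ih]
    by_cases h : x ∈ pvVOWELS
    · simp only [h, decide_true, if_pos]
      push_cast
      ring
    · simp [h]

theorem contains_only_vowels_spec : Claim_equal_contains_only_vowels := by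
  intro s _
  unfold Spec_contains_only_vowels contains_only_vowels contains_only_vowels_alt
  rw [Bool.eq_iff_iff]
  simp only [pv_foldl_count, zero_add]
  have hlen : (((PySem.Str.lower s).toList.length : Int)) = (PySem.Str.len s : Int) := by
    simp [PySem.Chars.lower]
  rw [← hlen]
  simp [List.countP_eq_length, PySem.Set.issubset_iff, PySem.Set.mem_ofList]
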